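-- pv_equiv track=rewrite | github.com/prudhvi6e/web-crawling | Final_Fleet.py | get_index_mapping_vvte
-- ===== SOURCE A (Python) =====
-- def get_index_mapping_vvte(FldVte_xovvtaf_ex_list, FldVte_vtdobdsm_ex_list) :
--     zero_to_one_check = False
--     index_mapping = []
--     for i in range(0, len(FldVte_xovvtaf_ex_list)) :
--         if FldVte_xovvtaf_ex_list[i] == 0 and zero_to_one_check:
--             zero_to_one_check = False
--         elif FldVte_xovvtaf_ex_list[i] == 1 and not zero_to_one_check:
--             zero_to_one_check = True
--             index_mapping.append({"index" : FldVte_vtdobdsm_ex_list[i]})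
--     return index_mapping
-- ===== SOURCE B (Python) =====
-- def get_index_mapping_vvte(FldVte_xovvtaf_ex_list, FldVte_vtdobdsm_ex_list):
--     # run-length view: keep only the binary entries (with their positions), then
--     # walk the runs of equal values, emitting the head of every run of 1s.
--     binary = [(i, v) for i, v in enumerate(FldVte_xovvtaf_ex_list) if v == 0 or v == 1]
--     out = []
--     n = len(binary)
--     k = 0
--     while k < n:
--         i0, v0 = binary[k]
--         if v0 == 1:
--             out.append({"index": FldVte_vtdobdsm_ex_list[i0]})
--         k += 1
--         while k < n and binary[k][1] == v0:   # skip the rest of this run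
--             k += 1
--     return out
-- ===== Notes on version B (the rewrite author's own statement) =====
-- stated objective: alternative
-- what changed: A's single stateful scan with a boolean rising-edge flag is replaced by a run-length algorithm: filter the binary (0/1) entries with their positions, then walk that list run by run (an inner loop skips each maximal run of equal values) emitting one record per run of 1s, taken at the run's head; no edge flag is threaded at all.
import Mathlib
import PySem

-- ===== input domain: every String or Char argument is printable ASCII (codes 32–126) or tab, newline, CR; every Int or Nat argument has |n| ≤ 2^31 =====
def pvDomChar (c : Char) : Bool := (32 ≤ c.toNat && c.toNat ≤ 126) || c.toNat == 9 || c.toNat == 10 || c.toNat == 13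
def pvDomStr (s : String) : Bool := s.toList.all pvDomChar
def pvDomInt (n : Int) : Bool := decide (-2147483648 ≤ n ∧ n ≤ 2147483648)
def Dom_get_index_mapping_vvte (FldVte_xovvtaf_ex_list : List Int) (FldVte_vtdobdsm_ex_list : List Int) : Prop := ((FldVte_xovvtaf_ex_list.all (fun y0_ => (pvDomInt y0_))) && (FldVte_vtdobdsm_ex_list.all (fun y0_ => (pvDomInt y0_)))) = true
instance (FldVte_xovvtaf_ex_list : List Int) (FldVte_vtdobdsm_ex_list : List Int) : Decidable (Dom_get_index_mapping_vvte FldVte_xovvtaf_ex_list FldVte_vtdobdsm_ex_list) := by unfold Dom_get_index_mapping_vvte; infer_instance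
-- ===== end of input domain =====

-- B replaces A's flag-driven edge-detecting scan by a run-length algorithm (filter binary entries,
-- then walk runs of equal values, emitting the head of each run of 1s) — alternative decomposition, same cost.
-- Pre_ excludes exactly the inputs where both Pythons raise IndexError: a rising edge at a position beyond the second list.


-- ===== PORT A =====
-- for i in range(0, len(a)): with the flag/append state threaded through a foldl
def get_index_mapping_vvte (FldVte_xovvtaf_ex_list : List Int) (FldVte_vtdobdsm_ex_list : List Int) : List (List (String × Int)) :=
  ((PySem.List.pyRange 0 (PySem.List.len FldVte_xovvtaf_ex_list) 1).foldl
    (fun (st : Bool × List (List (String × Int))) i =>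
      if PySem.List.pyGetD FldVte_xovvtaf_ex_list i 0 = 0 ∧ st.1 = true then (false, st.2)
      else if PySem.List.pyGetD FldVte_xovvtaf_ex_list i 0 = 1 ∧ st.1 = false then
        (true, st.2 ++ [[("index", PySem.List.pyGetD FldVte_vtdobdsm_ex_list i 0)]])
      else st)
    (false, [])).2

-- ===== PORT B =====
-- Source B's outer while over the remaining run-heads becomes structural recursion on the remaining
-- pair list; the inner 'skip the rest of this run' while becomes dropWhile (same traversal).
def pvBRun (b : List Int) : List (Int × Int) → List (List (String × Int))
  | [] => []
  | p :: rest =>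
      (if p.2 = 1 then [[("index", PySem.List.pyGetD b p.1 0)]] else ([] : List (List (String × Int))))
        ++ pvBRun b (rest.dropWhile (fun q => q.2 == p.2))
termination_by l => l.length
decreasing_by
  simp only [List.length_cons]
  exact Nat.lt_succ_of_le (List.length_dropWhile_le _ _)

def get_index_mapping_vvte_alt (FldVte_xovvtaf_ex_list : List Int) (FldVte_vtdobdsm_ex_list : List Int) : List (List (String × Int)) :=
  pvBRun FldVte_vtdobdsm_ex_list
    ((PySem.List.enumerate FldVte_xovvtaf_ex_list 0).filter (fun p => p.2 == 0 || p.2 == 1))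

-- ===== PRECONDITION & SPEC =====
-- Pre_ holds exactly when every rising edge of the first list (a 1 preceded, among the 0/1 entries, by
-- nothing or by a 0) lies at an index inside the second list; outside Pre_ both Pythons raise IndexError.
def Pre_get_index_mapping_vvte (FldVte_xovvtaf_ex_list : List Int) (FldVte_vtdobdsm_ex_list : List Int) : Prop :=
  ∀ i ∈ List.range FldVte_xovvtaf_ex_list.length,
    FldVte_xovvtaf_ex_list.getD i 0 = 1 →
    ((∀ j ∈ List.range i, FldVte_xovvtaf_ex_list.getD j 0 ≠ 0 ∧ FldVte_xovvtaf_ex_list.getD j 0 ≠ 1) ∨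
     (∃ j ∈ List.range i, FldVte_xovvtaf_ex_list.getD j 0 = 0 ∧
        ∀ k ∈ List.range i, j < k → FldVte_xovvtaf_ex_list.getD k 0 ≠ 0 ∧ FldVte_xovvtaf_ex_list.getD k 0 ≠ 1)) →
    i < FldVte_vtdobdsm_ex_list.length
instance (FldVte_xovvtaf_ex_list : List Int) (FldVte_vtdobdsm_ex_list : List Int) : Decidable (Pre_get_index_mapping_vvte FldVte_xovvtaf_ex_list FldVte_vtdobdsm_ex_list) := by unfold Pre_get_index_mapping_vvte; infer_instance
def pvWitness_get_index_mapping_vvte : List Int × List Int := ([1, 0, 5, 1, 1], [10, 20, 30, 40, 50])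
def Spec_get_index_mapping_vvte (FldVte_xovvtaf_ex_list : List Int) (FldVte_vtdobdsm_ex_list : List Int) (out : List (List (String × Int))) : Prop := out = get_index_mapping_vvte_alt FldVte_xovvtaf_ex_list FldVte_vtdobdsm_ex_list
instance (FldVte_xovvtaf_ex_list : List Int) (FldVte_vtdobdsm_ex_list : List Int) (out : List (List (String × Int))) : Decidable (Spec_get_index_mapping_vvte FldVte_xovvtaf_ex_list FldVte_vtdobdsm_ex_list out) := by unfold Spec_get_index_mapping_vvte; infer_instance

-- ===== CLAIM (what is proved, stated in full; the proofs are below) =====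
def Claim_equal_get_index_mapping_vvte : Prop := ∀ (FldVte_xovvtaf_ex_list : List Int) (FldVte_vtdobdsm_ex_list : List Int), Dom_get_index_mapping_vvte FldVte_xovvtaf_ex_list FldVte_vtdobdsm_ex_list → Pre_get_index_mapping_vvte FldVte_xovvtaf_ex_list FldVte_vtdobdsm_ex_list → Spec_get_index_mapping_vvte FldVte_xovvtaf_ex_list FldVte_vtdobdsm_ex_list (get_index_mapping_vvte FldVte_xovvtaf_ex_list FldVte_vtdobdsm_ex_list)

-- ===== LEMMAS AND PROOFS =====

-- Proof-only name for A's loop body acting on (index, value) pairs.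
def pvStepA (b : List Int) (st : Bool × List (List (String × Int))) (p : Int × Int) :
    Bool × List (List (String × Int)) :=
  if p.2 = 0 ∧ st.1 = true then (false, st.2)
  else if p.2 = 1 ∧ st.1 = false then (true, st.2 ++ [[("index", PySem.List.pyGetD b p.1 0)]])
  else st

-- Non-binary pairs are no-ops for A's step, so the fold may be restricted to the binary pairs.
lemma pv_foldl_filter (b : List Int) (l : List (Int × Int)) (st : Bool × List (List (String × Int))) :
    l.foldl (pvStepA b) st = (l.filter (fun p => p.2 == 0 || p.2 == 1)).foldl (pvStepA b) st := by
  induction l generalizing st with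
  | nil => rfl
  | cons p rest ih =>
    by_cases h : ((p.2 == 0 || p.2 == 1) = true)
    · simp only [List.filter_cons, h, if_pos, List.foldl_cons]; exact ih _
    · have hne : p.2 ≠ 0 ∧ p.2 ≠ 1 := by simpa using h
      have hstep : pvStepA b st p = st := by simp [pvStepA, hne.1, hne.2]
      simp only [List.filter_cons, h, List.foldl_cons, hstep]
      exact ih _

-- With the flag down, leading zero pairs are no-ops.
lemma pv_drop_zeros (b : List Int) (l : List (Int × Int)) (acc : List (List (String × Int))) :
    l.foldl (pvStepA b) (false, acc)
      = (l.dropWhile (fun q => q.2 == 0)).foldl (pvStepA b) (false, acc) := by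
  induction l with
  | nil => rfl
  | cons p rest ih =>
    by_cases h : p.2 = 0
    · have hstep : pvStepA b (false, acc) p = (false, acc) := by simp [pvStepA, h]
      simp only [List.dropWhile_cons, h, List.foldl_cons, hstep, beq_self_eq_true, if_pos]
      exact ih
    · simp [h]

-- Run correspondence: over a binary pair list, A's flag fold equals B's run recursion;
-- with the flag up, the current run of 1s is first skipped.
lemma pv_run (b : List Int) :
    ∀ n (l : List (Int × Int)), l.length ≤ n → (∀ p ∈ l, p.2 = 0 ∨ p.2 = 1) →
      ∀ acc : List (List (String × Int)),
        (l.foldl (pvStepA b) (false, acc)).2 = acc ++ pvBRun b l ∧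
        (l.foldl (pvStepA b) (true, acc)).2 = acc ++ pvBRun b (l.dropWhile (fun q => q.2 == 1)) := by
  intro n
  induction n with
  | zero =>
    intro l hl _ acc
    have : l = [] := List.eq_nil_of_length_eq_zero (Nat.le_zero.mp hl)
    subst this; simp [pvBRun]
  | succ n ih =>
    intro l hl hbin acc
    cases l with
    | nil => simp [pvBRun]
    | cons p rest =>
      have hrest_len : rest.length ≤ n := by
        simpa using Nat.lt_succ_iff.mp (Nat.lt_of_lt_of_le (by simp) hl)
      have hbin_rest : ∀ q ∈ rest, q.2 = 0 ∨ q.2 = 1 := fun q hq => hbin q (List.mem_cons_of_mem _ hq)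
      have hsub0 : ∀ q ∈ rest.dropWhile (fun q => q.2 == (0 : Int)), q.2 = 0 ∨ q.2 = 1 :=
        fun q hq => hbin_rest q ((List.dropWhile_sublist _).mem hq)
      have hlen0 : (rest.dropWhile (fun q => q.2 == (0 : Int))).length ≤ n :=
        le_trans (List.length_dropWhile_le _ _) hrest_len
      rcases hbin p (List.mem_cons_self ..) with h0 | h1
      · -- head value 0
        have hstepF : pvStepA b (false, acc) p = (false, acc) := by simp [pvStepA, h0]
        have hstepT : pvStepA b (true, acc) p = (false, acc) := by simp [pvStepA, h0]
        have heq : pvBRun b (p :: rest) = pvBRun b (rest.dropWhile (fun q => q.2 == (0 : Int))) := by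
          rw [pvBRun]; simp [h0]
        constructor
        · rw [List.foldl_cons, hstepF, pv_drop_zeros, (ih _ hlen0 hsub0 acc).1, heq]
        · have hdw : (p :: rest).dropWhile (fun q => q.2 == (1 : Int)) = p :: rest := by
            simp [h0]
          rw [List.foldl_cons, hstepT, pv_drop_zeros, (ih _ hlen0 hsub0 acc).1, hdw, heq]
      · -- head value 1
        have hstepF : pvStepA b (false, acc) p
            = (true, acc ++ [[("index", PySem.List.pyGetD b p.1 0)]]) := by simp [pvStepA, h1]
        have hstepT : pvStepA b (true, acc) p = (true, acc) := by simp [pvStepA, h1]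
        constructor
        · rw [List.foldl_cons, hstepF,
            (ih _ hrest_len hbin_rest (acc ++ [[("index", PySem.List.pyGetD b p.1 0)]])).2]
          rw [pvBRun]; simp [h1]
        · have hdw : (p :: rest).dropWhile (fun q => q.2 == (1 : Int))
              = rest.dropWhile (fun q => q.2 == (1 : Int)) := by
            simp [h1]
          rw [List.foldl_cons, hstepT, (ih _ hrest_len hbin_rest acc).2, hdw]

-- The two ports agree on every input (the precondition only delimits where the Pythons return).
lemma pv_ports_eq (a b : List Int) :
    get_index_mapping_vvte a b = get_index_mapping_vvte_alt a b := by
  have henum : (PySem.List.enumerate a 0).foldl (pvStepA b)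
        (false, ([] : List (List (String × Int))))
      = (PySem.List.pyRange 0 (PySem.List.len a) 1).foldl
          (fun (st : Bool × List (List (String × Int))) i =>
            if PySem.List.pyGetD a i 0 = 0 ∧ st.1 = true then (false, st.2)
            else if PySem.List.pyGetD a i 0 = 1 ∧ st.1 = false then
              (true, st.2 ++ [[("index", PySem.List.pyGetD b i 0)]])
            else st)
          (false, []) := by
    rw [PySem.List.enumerate_eq_map_pyRange (d := 0), List.foldl_map]
    rfl
  have hbin : ∀ p ∈ (PySem.List.enumerate a 0).filter (fun p => p.2 == 0 || p.2 == 1),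
      p.2 = 0 ∨ p.2 = 1 := by
    intro p hp
    have := (List.mem_filter.mp hp).2
    simpa using this
  unfold get_index_mapping_vvte get_index_mapping_vvte_alt
  rw [← henum, pv_foldl_filter]
  exact (pv_run b _ _ le_rfl hbin []).1

-- ===== VERDICT (by name: the statement is the Claim_ definition above) =====
theorem get_index_mapping_vvte_spec : Claim_equal_get_index_mapping_vvte := by
  intro a b _ _
  exact pv_ports_eq a b
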